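-- pv_equiv track=rewrite | github.com/bobeatslollipop/Online-Market-Project2 | proj2.py | FTL
-- ===== SOURCE A (Python) =====
-- def FTL(data):
--     n = len(data)
--     k = len(data[0])
--     V = [[0 for val in data[0]]]
--     does = []
--
--     for i in range(1, n):
--         V.append([data[i][j] + V[i-1][j] for j in range(k)])
--
--         argmax = 0
--         for j in range(k):
--             if V[i-1][j] == max(V[i-1]):
--                 argmax = j
--                 break
--         does.append(argmax)
--
--     return does
-- ===== SOURCE B (Python) =====
-- def FTL(data):
--     n = len(data)
--     k = len(data[0])
--     # column-major: cols[j] holds the cumulative sums of column j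
--     # (cols[j][t] = sum of data[1..t][j]), one column at a time
--     cols = []
--     for j in range(k):
--         s = 0
--         col = [0]
--         for i in range(1, n - 1):
--             s += data[i][j]
--             col.append(s)
--         cols.append(col)
--     return [max(range(k), key=lambda j: cols[j][t], default=0)
--             for t in range(n - 1)]
-- ===== Notes on version B (the rewrite author's own statement) =====
-- stated objective: alternative
-- what changed: A builds a row-major prefix-sum table and interleaves each append with a max()-then-scan-with-break argmax over the previous row; B works column-major: it accumulates each column's running sums into its own list (transposed layout, the last data row never summed), then produces each answer with a single key-based max over column indices.
import Mathlib
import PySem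

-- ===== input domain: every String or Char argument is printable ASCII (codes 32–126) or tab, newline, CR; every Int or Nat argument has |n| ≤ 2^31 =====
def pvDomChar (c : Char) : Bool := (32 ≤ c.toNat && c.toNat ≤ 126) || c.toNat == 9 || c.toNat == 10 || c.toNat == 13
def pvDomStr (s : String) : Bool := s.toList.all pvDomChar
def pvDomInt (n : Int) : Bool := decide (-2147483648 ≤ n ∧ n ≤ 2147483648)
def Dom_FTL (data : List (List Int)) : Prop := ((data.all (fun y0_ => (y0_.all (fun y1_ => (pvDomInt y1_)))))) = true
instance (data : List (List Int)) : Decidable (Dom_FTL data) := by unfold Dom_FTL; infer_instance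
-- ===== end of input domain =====

-- B is column-major: it accumulates each column's running sums into its own list
-- (transposed layout; the last data row is never summed) and then takes a key-based
-- first-max over column indices per output row, instead of A's row-major table
-- interleaved with a max()-then-scan-with-break argmax; same result, different structure.

-- ===== PORT A =====
-- A's inner loop: argmax = 0; for j in js: if prev[j] == max(prev): argmax = j; break
def FTL_argmaxLoop (prev : List Int) (js : List Int) : Int :=
  match js with
  | [] => 0
  | j :: rest =>
    if PySem.List.pyGetD prev j 0 = (PySem.List.max? prev (fun y => y)).getD 0 then j
    else FTL_argmaxLoop prev rest

def FTL (data : List (List Int)) : List Int :=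
  ((PySem.List.pyRange 1 (data.length : Int) 1).foldl
    (fun (st : List (List Int) × List Int) i =>
      let newRow := (PySem.List.pyRange 0 ((PySem.List.pyGetD data 0 []).length : Int) 1).map
        (fun j => PySem.List.pyGetD (PySem.List.pyGetD data i []) j 0
                  + PySem.List.pyGetD (PySem.List.pyGetD st.1 (i - 1) []) j 0)
      let V := st.1 ++ [newRow]
      (V, st.2 ++ [FTL_argmaxLoop (PySem.List.pyGetD V (i - 1) [])
                     (PySem.List.pyRange 0 ((PySem.List.pyGetD data 0 []).length : Int) 1)]))
    ([(PySem.List.pyGetD data 0 []).map (fun _ => (0 : Int))], ([] : List Int))).2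

-- ===== PORT B =====
def FTL_alt (data : List (List Int)) : List Int :=
  let n : Int := (data.length : Int)
  let k : Int := ((PySem.List.pyGetD data 0 []).length : Int)
  let cols := (PySem.List.pyRange 0 k 1).foldl
    (fun (cols : List (List Int)) j =>
      cols ++ [((PySem.List.pyRange 1 (n - 1) 1).foldl
        (fun (st : Int × List Int) i =>
          let s := st.1 + PySem.List.pyGetD (PySem.List.pyGetD data i []) j 0
          (s, st.2 ++ [s]))
        ((0 : Int), [(0 : Int)])).2]) []
  (PySem.List.pyRange 0 (n - 1) 1).map (fun t =>
    (PySem.List.max? (PySem.List.pyRange 0 k 1)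
      (fun j => PySem.List.pyGetD (PySem.List.pyGetD cols j []) t 0)).getD 0)

-- ===== PRECONDITION & SPEC =====
-- Pre_ excludes inputs where Python A raises IndexError: empty data (data[0]),
-- and rows after the first shorter than the first row (data[i][j], j < k).
def Pre_FTL (data : List (List Int)) : Prop :=
  data ≠ [] ∧ ∀ row ∈ data.tail, (data.headD []).length ≤ row.length
instance (data : List (List Int)) : Decidable (Pre_FTL data) := by unfold Pre_FTL; infer_instance

def pvWitness_FTL : List (List Int) := [[1, 3], [2, 0], [5, 1]]

def Spec_FTL (data : List (List Int)) (out : List Int) : Prop := out = FTL_alt data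
instance (data : List (List Int)) (out : List Int) : Decidable (Spec_FTL data out) := by unfold Spec_FTL; infer_instance

-- ===== CLAIM (what is proved, stated in full; the proofs are below) =====
def Claim_equal_FTL : Prop := ∀ (data : List (List Int)), Dom_FTL data → Pre_FTL data → Spec_FTL data (FTL data)

-- ===== LEMMAS AND PROOFS =====

-- pointwise sum of two vectors, truncating to the shorter (Python zip)
def FTL_zsum (a b : List Int) : List Int := (a.zip b).map (fun p => p.1 + p.2)

-- the m-th cumulative row: cur after folding the first m rows of ts onto cur
def FTL_P (cur : List Int) (ts : List (List Int)) : ℕ → List Int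
  | 0 => cur
  | m + 1 => FTL_zsum (FTL_P cur ts m) (ts.getD m [])

-- r is the FIRST index of a maximal element of l
def FTL_IsFA (l : List Int) (r : ℕ) : Prop :=
  r < l.length ∧ (∀ i < l.length, l.getD i 0 ≤ l.getD r 0) ∧ (∀ i < r, l.getD i 0 < l.getD r 0)

-- the fold inside PySem.List.max? (= Python's max with a key), over an abstract key
def FTL_mfold (key : Int → Int) (js : List Int) (acc : Option Int) : Option Int :=
  js.foldl
    (fun acc x =>
      match acc with
      | none => some x
      | some m => if key m < key x then some x else some m) acc

theorem FTL_max?_eq_mfold (js : List Int) (key : Int → Int) :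
    PySem.List.max? js key = FTL_mfold key js none := by
  unfold PySem.List.max? FTL_mfold
  apply PySem.List.foldl_congr_mem
  intro acc x _
  cases acc <;> rfl

theorem FTL_zsum_length (a b : List Int) : (FTL_zsum a b).length = min a.length b.length := by
  simp [FTL_zsum]

theorem FTL_zsum_getD (a b : List Int) (i : ℕ) (ha : i < a.length) (hb : i < b.length) :
    (FTL_zsum a b).getD i 0 = a.getD i 0 + b.getD i 0 := by
  have hi : i < (a.zip b).length := by simp; omega
  simp [FTL_zsum, List.getD_eq_getElem?_getD, ha, hb, List.getElem_zip]

theorem FTL_P_length (cur : List Int) (ts : List (List Int))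
    (hk : ∀ r ∈ ts, cur.length ≤ r.length) :
    ∀ m, m ≤ ts.length → (FTL_P cur ts m).length = cur.length := by
  intro m
  induction m with
  | zero => intro _; rfl
  | succ m ih =>
    intro hm
    have hlt : m < ts.length := by omega
    have hmem : ts.getD m [] ∈ ts := by
      simp [List.getD_eq_getElem?_getD, List.getElem?_eq_getElem hlt]
    have hlen := hk _ hmem
    rw [List.getD_eq_getElem?_getD] at hlen
    simp only [FTL_P, FTL_zsum_length, ih (by omega), List.getD_eq_getElem?_getD]
    omega

theorem FTL_row (a b : List Int) (hab : a.length ≤ b.length) :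
    (PySem.List.pyRange 0 (a.length : Int) 1).map
      (fun j => PySem.List.pyGetD b j 0 + PySem.List.pyGetD a j 0)
    = FTL_zsum a b := by
  apply List.ext_getElem
  · simp [PySem.List.length_pyRange_one, FTL_zsum_length]; omega
  · intro i h1 h2
    have hi : i < a.length := by simpa [PySem.List.length_pyRange_one] using h1
    have hib : i < b.length := by omega
    simp [FTL_zsum, PySem.List.getElem_pyRange_one, PySem.List.pyGetD_natCast,
      List.getD_eq_getElem?_getD, hi, hib]
    ring

theorem FTL_map_pyRange {α : Type} (m : ℕ) (f : Int → α) :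
    (PySem.List.pyRange 0 (m : Int) 1).map f = (List.range m).map (fun (t : ℕ) => f (t : Int)) := by
  apply List.ext_getElem
  · simp [PySem.List.length_pyRange_one]
  · intro i h1 h2
    have hi : i < m := by simpa [PySem.List.length_pyRange_one] using h1
    simp only [List.getElem_map, PySem.List.getElem_pyRange_one, List.getElem_range]
    norm_num

theorem FTL_foldA (d0 : List Int) (ts : List (List Int))
    (hk : ∀ r ∈ ts, d0.length ≤ r.length) :
    ∀ m : ℕ, m ≤ ts.length →
    (PySem.List.pyRange 1 ((m : Int) + 1) 1).foldl
      (fun (st : List (List Int) × List Int) i =>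
        let newRow := (PySem.List.pyRange 0 (d0.length : Int) 1).map
          (fun j => PySem.List.pyGetD (PySem.List.pyGetD (d0 :: ts) i []) j 0
                    + PySem.List.pyGetD (PySem.List.pyGetD st.1 (i - 1) []) j 0)
        let V := st.1 ++ [newRow]
        (V, st.2 ++ [FTL_argmaxLoop (PySem.List.pyGetD V (i - 1) [])
                       (PySem.List.pyRange 0 (d0.length : Int) 1)]))
      ([d0.map (fun _ => (0 : Int))], ([] : List Int))
    = ((List.range (m + 1)).map (FTL_P (List.replicate d0.length 0) ts),
       (List.range m).map (fun t => FTL_argmaxLoop (FTL_P (List.replicate d0.length 0) ts t)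
          (PySem.List.pyRange 0 (d0.length : Int) 1))) := by
  intro m
  induction m with
  | zero =>
    intro _
    rw [show ((0 : ℕ) : Int) + 1 = 1 by norm_num,
      PySem.List.pyRange_one_eq_nil (le_refl 1)]
    simp [FTL_P, List.map_const', List.range_succ]
  | succ m ih =>
    intro hm
    have hkr : ∀ r ∈ ts, (List.replicate d0.length (0 : Int)).length ≤ r.length := by
      simpa using hk
    have hPl : (FTL_P (List.replicate d0.length 0) ts m).length = d0.length := by
      have := FTL_P_length (List.replicate d0.length 0) ts hkr m (by omega)
      simpa using this
    have hmem : ts.getD m [] ∈ ts := by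
      have hlt : m < ts.length := by omega
      simp [List.getD_eq_getElem?_getD, List.getElem?_eq_getElem hlt]
    have hnew : (PySem.List.pyRange 0 (d0.length : Int) 1).map
        (fun j => PySem.List.pyGetD (ts.getD m []) j 0
          + PySem.List.pyGetD (FTL_P (List.replicate d0.length 0) ts m) j 0)
        = FTL_P (List.replicate d0.length 0) ts (m + 1) := by
      rw [show ((d0.length : Int)) = ((FTL_P (List.replicate d0.length 0) ts m).length : Int) by
        rw [hPl]]
      rw [FTL_row _ _ (by rw [hPl]; exact hk _ hmem)]
      rfl
    rw [show (((m + 1 : ℕ) : Int) + 1) = ((m : Int) + 1) + 1 by push_cast; ring,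
      PySem.List.pyRange_one_succ_right (by omega), List.foldl_append, ih (by omega)]
    simp only [List.foldl_cons, List.foldl_nil]
    simp only [add_sub_cancel_right]
    rw [show ((m : Int) + 1) = ((m + 1 : ℕ) : Int) by push_cast; ring]
    simp only [PySem.List.pyGetD_natCast]
    rw [PySem.List.getD_map_range (FTL_P (List.replicate d0.length 0) ts) (m + 1) m [] (by omega),
      show (d0 :: ts).getD (m + 1) [] = ts.getD m [] from rfl, hnew,
      show List.map (FTL_P (List.replicate d0.length 0) ts) (List.range (m + 1))
          ++ [FTL_P (List.replicate d0.length 0) ts (m + 1)]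
          = List.map (FTL_P (List.replicate d0.length 0) ts) (List.range (m + 1 + 1)) by
        conv_rhs => rw [List.range_succ]
        simp,
      PySem.List.getD_map_range (FTL_P (List.replicate d0.length 0) ts) (m + 1 + 1) m [] (by omega)]
    simp [List.range_succ]

-- B's per-column fold builds the column of cumulative sums at index jn
theorem FTL_colfold (d0 : List Int) (ts : List (List Int))
    (hk : ∀ r ∈ ts, d0.length ≤ r.length) (jn : ℕ) (hj : jn < d0.length) :
    ∀ m : ℕ, m ≤ ts.length →
    (PySem.List.pyRange 1 ((m : Int) + 1) 1).foldl
      (fun (st : Int × List Int) i =>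
        let s := st.1 + PySem.List.pyGetD (PySem.List.pyGetD (d0 :: ts) i []) (jn : Int) 0
        (s, st.2 ++ [s]))
      ((0 : Int), [(0 : Int)])
    = ((FTL_P (List.replicate d0.length 0) ts m).getD jn 0,
       (List.range (m + 1)).map (fun t => (FTL_P (List.replicate d0.length 0) ts t).getD jn 0)) := by
  intro m
  induction m with
  | zero =>
    intro _
    rw [show ((0 : ℕ) : Int) + 1 = 1 by norm_num,
      PySem.List.pyRange_one_eq_nil (le_refl 1)]
    simp [FTL_P, List.range_succ, List.getD_eq_getElem?_getD, hj]
  | succ m ih =>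
    intro hm
    have hkr : ∀ r ∈ ts, (List.replicate d0.length (0 : Int)).length ≤ r.length := by
      simpa using hk
    have hPl : (FTL_P (List.replicate d0.length 0) ts m).length = d0.length := by
      have := FTL_P_length (List.replicate d0.length 0) ts hkr m (by omega)
      simpa using this
    have hlt : m < ts.length := by omega
    have hmem : ts.getD m [] ∈ ts := by
      simp [List.getD_eq_getElem?_getD, List.getElem?_eq_getElem hlt]
    have hstep : (FTL_P (List.replicate d0.length 0) ts m).getD jn 0
        + (ts.getD m []).getD jn 0
        = (FTL_P (List.replicate d0.length 0) ts (m + 1)).getD jn 0 := by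
      show _ = (FTL_zsum (FTL_P (List.replicate d0.length 0) ts m) (ts.getD m [])).getD jn 0
      rw [FTL_zsum_getD _ _ jn (by omega) (by have := hk _ hmem; omega)]
    rw [show (((m + 1 : ℕ) : Int) + 1) = ((m : Int) + 1) + 1 by push_cast; ring,
      PySem.List.pyRange_one_succ_right (by omega), List.foldl_append, ih (by omega)]
    simp only [List.foldl_cons, List.foldl_nil]
    rw [show ((m : Int) + 1) = ((m + 1 : ℕ) : Int) by push_cast; ring]
    simp only [PySem.List.pyGetD_natCast,
      show (d0 :: ts).getD (m + 1) [] = ts.getD m [] from rfl, hstep]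
    rw [show List.range (m + 1 + 1) = List.range (m + 1) ++ [m + 1] from List.range_succ]
    simp

theorem FTL_IsFA_unique (l : List Int) (r s : ℕ) (hr : FTL_IsFA l r) (hs : FTL_IsFA l s) :
    r = s := by
  obtain ⟨hr1, hr2, hr3⟩ := hr
  obtain ⟨hs1, hs2, hs3⟩ := hs
  rcases lt_trichotomy r s with h | h | h
  · have h1 := hs3 r h
    have h2 := hr2 s hs1
    omega
  · exact h
  · have h1 := hr3 s h
    have h2 := hs2 r hr1
    omega

theorem FTL_loopA_inv (l : List Int) :
    ∀ (d a : ℕ), a + d = l.length →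
    (∃ i, a ≤ i ∧ i < l.length ∧ l.getD i 0 = (PySem.List.max? l (fun y => y)).getD 0) →
    (∀ i < a, l.getD i 0 ≠ (PySem.List.max? l (fun y => y)).getD 0) →
    ∃ r : ℕ, FTL_argmaxLoop l (PySem.List.pyRange (a : Int) (l.length : Int) 1) = (r : Int) ∧
      FTL_IsFA l r := by
  intro d
  induction d with
  | zero =>
    intro a h1 hex _
    obtain ⟨i, hai, hil, _⟩ := hex
    omega
  | succ d ih =>
    intro a h1 hex hprev
    have ha : a < l.length := by omega
    have hne : l ≠ [] := by
      intro hnil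
      rw [hnil] at ha
      simp at ha
    obtain ⟨mx, hmx⟩ : ∃ mx, PySem.List.max? l (fun y => y) = some mx := by
      cases hmax : PySem.List.max? l (fun y => y) with
      | none => exact absurd ((PySem.List.max?_eq_none_iff l (fun y => y)).mp hmax) hne
      | some mx => exact ⟨mx, rfl⟩
    have hub : ∀ i < l.length, l.getD i 0 ≤ mx := by
      intro i hi
      have hgd : l.getD i 0 = l[i] := by
        simp [List.getD_eq_getElem?_getD, List.getElem?_eq_getElem hi]
      rw [hgd]
      exact PySem.List.max?_isMax hmx _ (List.getElem_mem hi)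
    rw [PySem.List.pyRange_one_cons (by exact_mod_cast ha)]
    show ∃ r : ℕ, (if PySem.List.pyGetD l (a : Int) 0 = (PySem.List.max? l (fun y => y)).getD 0
        then ((a : Int))
        else FTL_argmaxLoop l (PySem.List.pyRange ((a : Int) + 1) (l.length : Int) 1)) = _ ∧ _
    have hcast : ((a : Int) + 1) = ((a + 1 : ℕ) : Int) := by push_cast; ring
    rw [hcast, PySem.List.pyGetD_natCast, hmx]
    by_cases h : l.getD a 0 = mx
    · rw [if_pos (by simpa using h)]
      refine ⟨a, rfl, ha, ?_, ?_⟩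
      · intro i hi
        rw [h]
        exact hub i hi
      · intro i hi
        have h1' := hub i (by omega)
        have h2' := hprev i hi
        rw [hmx, Option.getD_some] at h2'
        rw [h]
        omega
    · rw [if_neg (by simpa using h)]
      refine ih (a + 1) (by omega) ?_ ?_
      · obtain ⟨i, hai, hil, hiM⟩ := hex
        refine ⟨i, ?_, hil, hiM⟩
        rcases Nat.eq_or_lt_of_le hai with hi' | hi'
        · exfalso
          apply h
          rw [← hi'] at hiM
          rw [hiM, hmx]
          rfl
        · omega
      · intro i hi
        rcases Nat.lt_succ_iff_lt_or_eq.mp hi with hi' | hi'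
        · exact hprev i hi'
        · rw [hi', hmx]
          simpa using h

theorem FTL_mfold_inv (l : List Int) (key : Int → Int)
    (hkey : ∀ i : ℕ, i < l.length → key (i : Int) = l.getD i 0) :
    ∀ (d a b : ℕ), a + d = l.length → b < a →
    (∀ i < a, l.getD i 0 ≤ l.getD b 0) → (∀ i < b, l.getD i 0 < l.getD b 0) →
    ∃ r : ℕ, FTL_mfold key (PySem.List.pyRange (a : Int) (l.length : Int) 1) (some (b : Int))
        = some (r : Int) ∧ FTL_IsFA l r := by
  intro d
  induction d with
  | zero =>
    intro a b h1 h2 h3 h4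
    rw [PySem.List.pyRange_one_eq_nil (by exact_mod_cast (show l.length ≤ a by omega))]
    exact ⟨b, rfl, by omega, fun i hi => h3 i (by omega), h4⟩
  | succ d ih =>
    intro a b h1 h2 h3 h4
    have ha : a < l.length := by omega
    rw [PySem.List.pyRange_one_cons (by exact_mod_cast ha)]
    show ∃ r : ℕ, FTL_mfold key (PySem.List.pyRange ((a : Int) + 1) (l.length : Int) 1)
        (if key (b : Int) < key (a : Int) then some (a : Int) else some (b : Int))
        = _ ∧ _
    have hcast : ((a : Int) + 1) = ((a + 1 : ℕ) : Int) := by push_cast; ring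
    rw [hcast, hkey a ha, hkey b (by omega)]
    by_cases h : l.getD b 0 < l.getD a 0
    · rw [if_pos h]
      exact ih (a + 1) a (by omega) (by omega)
        (fun i hi => by
          rcases Nat.lt_succ_iff_lt_or_eq.mp hi with hi' | hi'
          · exact le_of_lt (lt_of_le_of_lt (h3 i hi') h)
          · exact hi' ▸ le_refl _)
        (fun i hi => lt_of_le_of_lt (h3 i hi) h)
    · rw [if_neg h]
      exact ih (a + 1) b (by omega) (by omega)
        (fun i hi => by
          rcases Nat.lt_succ_iff_lt_or_eq.mp hi with hi' | hi'
          · exact h3 i hi'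
          · exact hi' ▸ le_of_not_gt h)
        h4

theorem FTL_argEq (l : List Int) (key : Int → Int)
    (hkey : ∀ i : ℕ, i < l.length → key (i : Int) = l.getD i 0) :
    FTL_argmaxLoop l (PySem.List.pyRange 0 (l.length : Int) 1)
      = (FTL_mfold key (PySem.List.pyRange 0 (l.length : Int) 1) none).getD 0 := by
  by_cases hl : l = []
  · subst hl
    rw [show ((List.length ([] : List Int) : Int)) = 0 from rfl,
      PySem.List.pyRange_one_eq_nil (le_refl 0)]
    rfl
  · have hlen : 1 ≤ l.length := by
      cases l with
      | nil => exact absurd rfl hl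
      | cons x xs => simp
    obtain ⟨mx, hmx⟩ : ∃ mx, PySem.List.max? l (fun y => y) = some mx := by
      cases hmax : PySem.List.max? l (fun y => y) with
      | none => exact absurd ((PySem.List.max?_eq_none_iff l (fun y => y)).mp hmax) hl
      | some mx => exact ⟨mx, rfl⟩
    obtain ⟨i, hil, hieq⟩ := List.mem_iff_getElem.mp (PySem.List.max?_mem hmx)
    obtain ⟨rA, hA, hFA⟩ := FTL_loopA_inv l l.length 0 (by omega)
      ⟨i, by omega, hil, by
        rw [hmx, Option.getD_some, ← hieq]
        simp [List.getD_eq_getElem?_getD, List.getElem?_eq_getElem hil]⟩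
      (fun i hi => absurd hi (by omega))
    obtain ⟨rB, hB, hFB⟩ := FTL_mfold_inv l key hkey (l.length - 1) 1 0 (by omega) (by omega)
      (fun i hi => by
        have : i = 0 := by omega
        rw [this])
      (fun i hi => absurd hi (by omega))
    have h0 : (0 : Int) < (l.length : Int) := by exact_mod_cast hlen
    rw [Nat.cast_zero] at hA
    have hstep : FTL_mfold key (PySem.List.pyRange 0 (l.length : Int) 1) none
        = FTL_mfold key (PySem.List.pyRange ((1 : ℕ) : Int) (l.length : Int) 1)
            (some ((0 : ℕ) : Int)) := by
      rw [PySem.List.pyRange_one_cons h0]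
      norm_num [FTL_mfold]
    rw [hA, hstep, hB, Option.getD_some, FTL_IsFA_unique l rA rB hFA hFB]

-- ===== VERDICT (by name: the statement is the Claim_ definition above) =====
theorem FTL_spec : Claim_equal_FTL := by
  intro data _ hpre
  obtain ⟨hne, hrows⟩ := hpre
  cases data with
  | nil => exact absurd rfl hne
  | cons d0 ts =>
    have hk : ∀ r ∈ ts, d0.length ≤ r.length := by simpa using hrows
    have hkr : ∀ r ∈ ts, (List.replicate d0.length (0 : Int)).length ≤ r.length := by
      simpa using hk
    unfold Spec_FTL
    have hA : FTL (d0 :: ts) = (List.range ts.length).map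
        (fun t => FTL_argmaxLoop (FTL_P (List.replicate d0.length 0) ts t)
          (PySem.List.pyRange 0 (d0.length : Int) 1)) := by
      unfold FTL
      rw [show (((d0 :: ts).length : ℕ) : Int) = ((ts.length : ℕ) : Int) + 1 by
        push_cast [List.length_cons]; ring]
      simp only [PySem.List.pyGetD_zero_cons]
      rw [FTL_foldA d0 ts hk ts.length (le_refl _)]
    have hB : FTL_alt (d0 :: ts) = (List.range ts.length).map
        (fun (tn : ℕ) => (FTL_mfold
          (fun j => PySem.List.pyGetD (PySem.List.pyGetD
            ((List.range d0.length).map (fun (jn : ℕ) =>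
              ((PySem.List.pyRange 1 ((((ts.length : ℕ) : Int) + 1) - 1) 1).foldl
                (fun (st : Int × List Int) i =>
                  let s := st.1 + PySem.List.pyGetD (PySem.List.pyGetD (d0 :: ts) i []) (jn : Int) 0
                  (s, st.2 ++ [s]))
                ((0 : Int), [(0 : Int)])).2)) j []) (tn : Int) 0)
          (PySem.List.pyRange 0 (d0.length : Int) 1) none).getD 0) := by
      unfold FTL_alt
      simp only [PySem.List.pyGetD_zero_cons]
      rw [show (((d0 :: ts).length : ℕ) : Int) = ((ts.length : ℕ) : Int) + 1 by
        push_cast [List.length_cons]; ring]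
      rw [PySem.List.foldl_append_singleton_eq_map, List.nil_append]
      rw [show (((ts.length : ℕ) : Int) + 1) - 1 = ((ts.length : ℕ) : Int) by ring]
      rw [FTL_map_pyRange d0.length, FTL_map_pyRange ts.length]
      apply List.map_congr_left
      intro tn _
      rw [FTL_max?_eq_mfold]
    rw [hA, hB]
    apply List.map_congr_left
    intro tn ht
    have htl : tn < ts.length := List.mem_range.mp ht
    have hPl : (FTL_P (List.replicate d0.length 0) ts tn).length = d0.length := by
      have := FTL_P_length (List.replicate d0.length 0) ts hkr tn (by omega)
      simpa using this
    have hkey : ∀ jn : ℕ, jn < (FTL_P (List.replicate d0.length 0) ts tn).length →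
        PySem.List.pyGetD (PySem.List.pyGetD
          ((List.range d0.length).map (fun (jn : ℕ) =>
            ((PySem.List.pyRange 1 ((((ts.length : ℕ) : Int) + 1) - 1) 1).foldl
              (fun (st : Int × List Int) i =>
                let s := st.1 + PySem.List.pyGetD (PySem.List.pyGetD (d0 :: ts) i []) (jn : Int) 0
                (s, st.2 ++ [s]))
              ((0 : Int), [(0 : Int)])).2)) (jn : Int) []) (tn : Int) 0
        = (FTL_P (List.replicate d0.length 0) ts tn).getD jn 0 := by
      intro jn hjn
      rw [hPl] at hjn
      have hts : ts.length = (ts.length - 1) + 1 := by omega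
      rw [show (((ts.length : ℕ) : Int) + 1) - 1 = (((ts.length - 1 : ℕ) : Int) + 1) by
        omega]
      rw [PySem.List.pyGetD_natCast]
      rw [PySem.List.pyGetD_natCast]
      simp only [PySem.List.getD_map_range _ d0.length jn [] hjn,
        FTL_colfold d0 ts hk jn hjn (ts.length - 1) (by omega)]
      rw [PySem.List.getD_map_range _ ((ts.length - 1) + 1) tn 0 (by omega)]
    rw [show ((d0.length : Int)) = ((FTL_P (List.replicate d0.length 0) ts tn).length : Int) by
      rw [hPl]]
    exact FTL_argEq _ _ hkey
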